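-- pv_equiv track=rewrite | github.com/AnqiXu7/Lyapunov-ML-PowerSystems | Code/PSLY/Lyfunction/06.py | encode_base1000
-- ===== SOURCE A (Python) =====
-- def encode_base1000(n):
--     if n == 0:
--         return "0"
--     chunks = []
--     n = abs(int(n))
--     while n > 0:
--         chunks.append(str(n % 1000))
--         n = n // 1000
--     return " ".join(reversed(chunks))
-- ===== SOURCE B (Python) =====
-- def encode_base1000(n):
--     if n == 0:
--         return "0"
--     m = abs(int(n))
--     p = 1
--     while m >= p * 1000:
--         p *= 1000
--     return " ".join(_top_chunks(m, p))
--
-- def _top_chunks(m, p):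
--     # emit chunks most-significant-first by dividing by descending powers of 1000
--     if p < 1:
--         return []
--     return [str(m // p % 1000)] + _top_chunks(m, p // 1000)
-- ===== Notes on version B (the rewrite author's own statement) =====
-- stated objective: alternative
-- what changed: Instead of collecting least-significant chunks with repeated divmod and then reversing and joining, B first finds the largest power of 1000 not exceeding |n| and then extracts chunks most-significant-first as m // p % 1000 over descending powers, so no reversal is needed.
import Mathlib
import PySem

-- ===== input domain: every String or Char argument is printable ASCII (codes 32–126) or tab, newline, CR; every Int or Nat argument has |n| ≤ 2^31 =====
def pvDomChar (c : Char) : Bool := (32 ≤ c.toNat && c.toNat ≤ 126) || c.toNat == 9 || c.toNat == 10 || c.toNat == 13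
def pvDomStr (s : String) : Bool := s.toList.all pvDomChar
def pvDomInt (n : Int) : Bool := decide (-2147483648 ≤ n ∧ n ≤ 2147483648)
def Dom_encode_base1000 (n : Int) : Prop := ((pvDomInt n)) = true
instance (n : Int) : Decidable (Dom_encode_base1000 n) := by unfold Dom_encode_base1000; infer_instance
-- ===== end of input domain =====

-- B replaces A's collect-then-reverse-then-join divmod loop by finding the largest power of
-- 1000 not exceeding |n| and extracting chunks most-significant-first (objective: alternative).

-- termination measures for the ports' while-loops (cited by name in decreasing_by)
theorem pvFd_lt (n : Int) (h : 0 < n) : (PySem.Int.floordiv n 1000).toNat < n.toNat := by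
  rw [PySem.Int.floordiv_eq_ediv_of_pos (by norm_num)]
  exact (Int.toNat_lt_toNat h).mpr (Int.ediv_lt_of_lt_mul (by norm_num) (lt_mul_right h (by norm_num)))

theorem pvPow_dec (m p : Int) (h : 0 < p ∧ p * 1000 ≤ m) :
    (m - p * 1000).toNat < (m - p).toNat := by
  have hpp : p < p * 1000 := lt_mul_right h.1 (by norm_num)
  exact (Int.toNat_lt_toNat (by linarith)).mpr (by linarith)

-- ===== PORT A =====
-- the while loop: chunks.append(str(n % 1000)); n = n // 1000
def pvLoopA (n : Int) (chunks : List (List Char)) : List (List Char) :=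
  if h : n > 0 then
    pvLoopA (PySem.Int.floordiv n 1000) (chunks ++ [PySem.Int.toChars (PySem.Int.mod n 1000)])
  else chunks
termination_by n.toNat
decreasing_by exact pvFd_lt n h

def encode_base1000 (n : Int) : String :=
  if n = 0 then "0"
  else String.ofList (PySem.Chars.join [' '] (pvLoopA |n| []).reverse)

-- ===== PORT B =====
-- the while loop: while m >= p * 1000: p *= 1000   (the 0 < p conjunct only makes the
-- recursion total; every reachable call has p ≥ 1)
def pvPowB (m p : Int) : Int :=
  if h : 0 < p ∧ p * 1000 ≤ m then pvPowB m (p * 1000) else p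
termination_by (m - p).toNat
decreasing_by exact pvPow_dec m p h

-- _top_chunks(m, p): chunks most-significant-first over descending powers of 1000
def pvTopB (m p : Int) : List (List Char) :=
  if h : 1 ≤ p then
    PySem.Int.toChars (PySem.Int.mod (PySem.Int.floordiv m p) 1000) :: pvTopB m (PySem.Int.floordiv p 1000)
  else []
termination_by p.toNat
decreasing_by exact pvFd_lt p (by omega)

def encode_base1000_alt (n : Int) : String :=
  if n = 0 then "0"
  else String.ofList (PySem.Chars.join [' '] (pvTopB |n| (pvPowB |n| 1)))

-- ===== PRECONDITION & SPEC =====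
def Spec_encode_base1000 (n : Int) (out : String) : Prop := out = encode_base1000_alt n
instance (n : Int) (out : String) : Decidable (Spec_encode_base1000 n out) := by unfold Spec_encode_base1000; infer_instance

-- ===== CLAIM (what is proved, stated in full; the proofs are below) =====
def Claim_equal_encode_base1000 : Prop := ∀ (n : Int), Dom_encode_base1000 n → Spec_encode_base1000 n (encode_base1000 n)

-- ===== LEMMAS AND PROOFS =====

-- the common chunk at power 1000^i
def pvChunk (m : Int) (i : Nat) : List Char :=
  PySem.Int.toChars (PySem.Int.mod (PySem.Int.floordiv m (1000 ^ i)) 1000)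

theorem pvLoopA_shift (k : Nat) : ∀ n : Int, n.toNat ≤ k → ∀ c, pvLoopA n c = c ++ pvLoopA n [] := by
  induction k with
  | zero =>
    intro n hn c
    have h : ¬ n > 0 := by omega
    conv_lhs => rw [pvLoopA]
    conv_rhs => rw [pvLoopA]
    simp [h]
  | succ k ih =>
    intro n hn c
    by_cases h : n > 0
    · have hfd : (PySem.Int.floordiv n 1000).toNat ≤ k := by
        have := pvFd_lt n h; omega
      conv_lhs => rw [pvLoopA]
      conv_rhs => rw [pvLoopA]
      simp only [h, dite_true, List.nil_append]
      rw [ih _ hfd, ih _ hfd ([PySem.Int.toChars (PySem.Int.mod n 1000)])]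
      simp
    · conv_lhs => rw [pvLoopA]
      conv_rhs => rw [pvLoopA]
      simp [h]

-- A's loop lists the chunks least-significant-first
theorem pvLoopA_eq_range (j : Nat) : ∀ m : Int, 1000 ^ j ≤ m → m < 1000 ^ (j + 1) →
    pvLoopA m [] = (List.range (j + 1)).map (pvChunk m) := by
  induction j with
  | zero =>
    intro m h1 h2
    have hm : m > 0 := by simpa using lt_of_lt_of_le (by norm_num) h1
    rw [pvLoopA]
    simp only [hm, dite_true, List.nil_append]
    have hq : PySem.Int.floordiv m 1000 = 0 := by
      rw [PySem.Int.floordiv_eq_ediv_of_pos (by norm_num)]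
      exact Int.ediv_eq_zero_of_lt (le_of_lt hm) (by simpa using h2)
    rw [pvLoopA_shift (PySem.Int.floordiv m 1000).toNat _ le_rfl, hq, pvLoopA]
    simp [pvChunk]
  | succ j ih =>
    intro m h1 h2
    have hm : m > 0 := lt_of_lt_of_le (by positivity) h1
    rw [pvLoopA]
    simp only [hm, dite_true, List.nil_append]
    rw [pvLoopA_shift (PySem.Int.floordiv m 1000).toNat _ le_rfl]
    have hfd : PySem.Int.floordiv m 1000 = m / 1000 :=
      PySem.Int.floordiv_eq_ediv_of_pos (by norm_num)
    have hlo : 1000 ^ j ≤ m / 1000 := by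
      rw [Int.le_ediv_iff_mul_le (by norm_num)]
      calc (1000:Int) ^ j * 1000 = 1000 ^ (j + 1) := by ring
        _ ≤ m := h1
    have hhi : m / 1000 < 1000 ^ (j + 1) := by
      rw [Int.ediv_lt_iff_lt_mul (by norm_num)]
      calc m < 1000 ^ (j + 2) := h2
        _ = 1000 ^ (j + 1) * 1000 := by ring
    rw [hfd, ih _ hlo hhi]
    conv_rhs => rw [List.range_succ_eq_map]
    simp only [List.map_cons, List.map_map]
    simp [pvChunk]
    intro a _
    rw [Int.ediv_ediv_of_nonneg (by norm_num),
      show (1000:Int) * 1000 ^ a = 1000 ^ (a + 1) by ring]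

-- B's top-down loop lists the same chunks most-significant-first
theorem pvTopB_eq_range (j : Nat) (m : Int) :
    pvTopB m (1000 ^ j) = ((List.range (j + 1)).map (pvChunk m)).reverse := by
  induction j with
  | zero =>
    rw [pvTopB]
    have hq : PySem.Int.floordiv (1000 ^ 0 : Int) 1000 = 0 := by decide
    rw [hq, pvTopB]
    simp [pvChunk]
  | succ j ih =>
    rw [pvTopB]
    have hp : (1:Int) ≤ 1000 ^ (j + 1) := one_le_pow₀ (by norm_num)
    have hq : PySem.Int.floordiv ((1000:Int) ^ (j + 1)) 1000 = 1000 ^ j := by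
      rw [PySem.Int.floordiv_eq_ediv_of_pos (by norm_num), pow_succ,
        Int.mul_ediv_cancel _ (by norm_num)]
    simp only [hp, dite_true, hq, ih, List.range_succ]
    simp [pvChunk]

-- the power-finding loop returns the largest power of 1000 not exceeding m
theorem pvPowB_spec (k : Nat) : ∀ m p : Int, (m - p).toNat ≤ k → 0 < p → p ≤ m →
    ∃ j : Nat, pvPowB m p = p * 1000 ^ j ∧ pvPowB m p ≤ m ∧ m < pvPowB m p * 1000 := by
  induction k with
  | zero =>
    intro m p hk hp hpm
    have hc : ¬ (0 < p ∧ p * 1000 ≤ m) := by omega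
    rw [pvPowB, dif_neg hc]
    exact ⟨0, by ring, hpm, by omega⟩
  | succ k ih =>
    intro m p hk hp hpm
    by_cases hc : 0 < p ∧ p * 1000 ≤ m
    · rw [pvPowB, dif_pos hc]
      obtain ⟨j, h1, h2, h3⟩ := ih m (p * 1000) (by omega) (by omega) hc.2
      exact ⟨j + 1, by rw [h1]; ring, h2, h3⟩
    · rw [pvPowB, dif_neg hc]
      exact ⟨0, by ring, hpm, by omega⟩

-- ===== VERDICT (by name: the statement is the Claim_ definition above) =====
theorem encode_base1000_spec : Claim_equal_encode_base1000 := by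
  intro n _
  unfold Spec_encode_base1000 encode_base1000 encode_base1000_alt
  by_cases h0 : n = 0
  · simp [h0]
  · have hpos : 0 < |n| := abs_pos.mpr h0
    simp only [h0, if_false]
    obtain ⟨j, h1, h2, h3⟩ := pvPowB_spec (|n| - 1).toNat |n| 1 (by omega) (by norm_num) hpos
    rw [one_mul] at h1
    rw [h1] at h2 h3
    rw [h1, pvTopB_eq_range, ← pvLoopA_eq_range j _ h2 (by rw [pow_succ]; exact h3)]
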